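-- pv_equiv track=rewrite | github.com/diego-aquino/competitive-programming | Google Kickstart/Round C 2020/problem1.py | getCountdowns
-- ===== SOURCE A (Python) =====
-- def getCountdowns(case):
--    # sortedNumbers = sort(case[2])
--    countdowns = 0
--
--    skipUntil = -1
--    for i in range(case[0]):
--       if i <= skipUntil:
--          continue
--       else:
--          if case[2][i] == case[1]:
--             for j in range(i + 1, case[0]):
--                if case[2][j] == case[2][i] - (j - i):
--                   if case[2][j] == 1:
--                      countdowns += 1
--                      skipUntil = j
--                else: break
--
--    return countdowns
-- ===== SOURCE B (Python) =====
-- def getCountdowns(case):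
--     count = 0
--     need = None  # next expected value of an active countdown, or None
--     for i in range(case[0]):
--         x = case[2][i]
--         if need is not None and x == need:
--             if x == 1:
--                 count += 1
--                 need = None
--             else:
--                 need = x - 1
--         elif x == case[1]:
--             need = case[1] - 1
--         else:
--             need = None
--     return count
-- ===== Notes on version B (the rewrite author's own statement) =====
-- stated objective: simpler
-- what changed: Replaced A's nested inner scan with a back-pointer (skipUntil) and outer rescanning by a single flat forward pass maintaining one state variable `need` (the next expected countdown value), preserving K<=1 -> 0 and restart-on-K behaviour.
import Mathlib
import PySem

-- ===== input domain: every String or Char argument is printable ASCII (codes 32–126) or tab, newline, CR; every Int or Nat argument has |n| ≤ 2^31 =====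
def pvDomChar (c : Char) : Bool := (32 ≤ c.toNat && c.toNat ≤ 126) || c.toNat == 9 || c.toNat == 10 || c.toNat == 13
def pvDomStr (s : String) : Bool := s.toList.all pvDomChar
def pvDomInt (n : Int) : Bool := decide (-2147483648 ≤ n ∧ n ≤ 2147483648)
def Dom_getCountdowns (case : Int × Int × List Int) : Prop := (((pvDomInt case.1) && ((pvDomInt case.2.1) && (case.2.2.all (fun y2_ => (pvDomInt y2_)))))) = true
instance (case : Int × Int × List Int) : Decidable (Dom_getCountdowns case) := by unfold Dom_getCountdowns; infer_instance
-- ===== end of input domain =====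

-- B replaces A's nested rescan with skipUntil by a single forward pass keeping one
-- `need` state variable (objective: simpler). Equal return value on Pre_ (n ≤ len).

-- ===== PORT A =====
-- case[2][j] is total via pyGetD _ _ 0; Pre_ excludes the out-of-range indices on which Python raises IndexError.
def pvG (arr : List Int) (j : Int) : Int := PySem.List.pyGetD arr j 0

-- the inner `for j in range(i+1, case[0])` loop with its break
def pvInnerA (arr : List Int) (i : Int) (js : List Int) (st : Int × Int) : Int × Int :=
  match js with
  | [] => st
  | j :: rest =>
    if pvG arr j = pvG arr i - (j - i) then
      if pvG arr j = 1 then pvInnerA arr i rest (st.1 + 1, j)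
      else pvInnerA arr i rest st
    else st

-- the outer `for i in range(case[0])` loop; st = (countdowns, skipUntil)
def pvOuterA (n k : Int) (arr : List Int) (is_ : List Int) (st : Int × Int) : Int × Int :=
  match is_ with
  | [] => st
  | i :: rest =>
    if i ≤ st.2 then pvOuterA n k arr rest st
    else if pvG arr i = k then
      pvOuterA n k arr rest (pvInnerA arr i (PySem.List.pyRange (i+1) n 1) st)
    else pvOuterA n k arr rest st

def getCountdowns (case : Int × Int × List Int) : Int :=
  (pvOuterA case.1 case.2.1 case.2.2 (PySem.List.pyRange 0 case.1 1) (0, -1)).1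

-- ===== PORT B =====
-- single pass; need = next expected value of an active countdown, or none
def pvLoopB (k : Int) (arr : List Int) (is_ : List Int) (c : Int) (need : Option Int) : Int :=
  match is_ with
  | [] => c
  | i :: rest =>
    match need with
    | some m =>
      if pvG arr i = m then
        if pvG arr i = 1 then pvLoopB k arr rest (c + 1) none
        else pvLoopB k arr rest c (some (pvG arr i - 1))
      else if pvG arr i = k then pvLoopB k arr rest c (some (k - 1))
      else pvLoopB k arr rest c none
    | none =>
      if pvG arr i = k then pvLoopB k arr rest c (some (k - 1))
      else pvLoopB k arr rest c none

def getCountdowns_alt (case : Int × Int × List Int) : Int :=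
  pvLoopB case.2.1 case.2.2 (PySem.List.pyRange 0 case.1 1) 0 none

-- ===== PRECONDITION & SPEC =====
-- Pre_: exactly the inputs where Python A returns (case[0] within the list length; otherwise IndexError)
def Pre_getCountdowns (case : Int × Int × List Int) : Prop := case.1 ≤ (case.2.2.length : Int)
instance (case : Int × Int × List Int) : Decidable (Pre_getCountdowns case) := by unfold Pre_getCountdowns; infer_instance

def pvWitness_getCountdowns : (Int × Int × List Int) := (5, 3, [3, 2, 3, 2, 1])

def Spec_getCountdowns (case : Int × Int × List Int) (out : Int) : Prop := out = getCountdowns_alt case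
instance (case : Int × Int × List Int) (out : Int) : Decidable (Spec_getCountdowns case out) := by unfold Spec_getCountdowns; infer_instance

-- ===== CLAIM (what is proved, stated in full; the proofs are below) =====
def Claim_equal_getCountdowns : Prop := ∀ (case : Int × Int × List Int), Dom_getCountdowns case → Pre_getCountdowns case → Spec_getCountdowns case (getCountdowns case)

-- ===== LEMMAS AND PROOFS =====

-- the skipUntil component of the inner loop never decreases below a bound kept by all indices
lemma pvInner_skip_ge (arr : List Int) (i : Int) (js : List Int) (b : Int) :
    ∀ st : Int × Int, b ≤ st.2 → (∀ x ∈ js, b ≤ x) → b ≤ (pvInnerA arr i js st).2 := by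
  induction js with
  | nil => intro st h _; simpa [pvInnerA] using h
  | cons j rest ih =>
    intro st h hm
    simp only [pvInnerA]
    split_ifs with h1 h2
    · exact ih (st.1 + 1, j) (hm j (by simp)) (fun x hx => hm x (by simp [hx]))
    · exact ih st h (fun x hx => hm x (by simp [hx]))
    · exact h

-- a dead countdown state (expected value ≤ 0, with k ≥ 1) behaves like none
lemma pvLoopB_nonpos (k : Int) (arr : List Int) (hk : 1 ≤ k) (js : List Int) :
    ∀ (c m : Int), m ≤ 0 → pvLoopB k arr js c (some m) = pvLoopB k arr js c none := by
  induction js with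
  | nil => intro c m _; simp [pvLoopB]
  | cons j rest ih =>
    intro c m hm
    simp only [pvLoopB]
    by_cases h1 : pvG arr j = m
    · rw [if_pos h1, if_neg (by omega), if_neg (by omega)]
      exact ih c (pvG arr j - 1) (by omega)
    · rw [if_neg h1]

-- on a mismatching head, the some-state step is the none-state step
lemma pvLoopB_mismatch (k : Int) (arr : List Int) (j : Int) (rest : List Int) (c m : Int)
    (h : pvG arr j ≠ m) :
    pvLoopB k arr (j :: rest) c (some m) = pvLoopB k arr (j :: rest) c none := by
  simp only [pvLoopB]
  rw [if_neg h]

-- main invariant: S1 (both loops in sync with no active countdown) ∧ S2 (A just after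
-- starting the inner scan at i, B carrying the expected value), over the range tail at j
lemma pvMain (n k : Int) (arr : List Int) :
    ∀ (m : Nat) (j : Int), n - j ≤ (m : Int) →
      ((∀ c skip, skip < j →
          (pvOuterA n k arr (PySem.List.pyRange j n 1) (c, skip)).1
            = pvLoopB k arr (PySem.List.pyRange j n 1) c none)
       ∧ (∀ i c skip, i < j → skip < j → pvG arr i = k →
          (pvOuterA n k arr (PySem.List.pyRange j n 1)
              (pvInnerA arr i (PySem.List.pyRange j n 1) (c, skip))).1
            = pvLoopB k arr (PySem.List.pyRange j n 1) c (some (pvG arr i - (j - i))))) := by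
  intro m
  induction m with
  | zero =>
    intro j hj
    rw [PySem.List.pyRange_one_eq_nil (by omega)]
    exact ⟨fun c skip _ => rfl, fun i c skip _ _ _ => rfl⟩
  | succ m ih =>
    intro j hj
    by_cases hcase : n ≤ j
    · rw [PySem.List.pyRange_one_eq_nil hcase]
      exact ⟨fun c skip _ => rfl, fun i c skip _ _ _ => rfl⟩
    · have hjn : j < n := by omega
      have ihs := ih (j + 1) (by omega)
      have hS1 : ∀ c skip, skip < j →
          (pvOuterA n k arr (PySem.List.pyRange j n 1) (c, skip)).1
            = pvLoopB k arr (PySem.List.pyRange j n 1) c none := by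
        intro c skip hsk
        rw [PySem.List.pyRange_one_cons hjn]
        simp only [pvOuterA, pvLoopB]
        rw [if_neg (by omega : ¬ j ≤ (c, skip).2)]
        by_cases hk : pvG arr j = k
        · rw [if_pos hk, if_pos hk]
          have := ihs.2 j c skip (by omega) (by omega) hk
          rw [this]
          congr 2
          omega
        · rw [if_neg hk, if_neg hk]
          exact ihs.1 c skip (by omega)
      refine ⟨hS1, ?_⟩
      intro i c skip hij hsk hgi
      rw [PySem.List.pyRange_one_cons hjn]
      simp only [pvInnerA]
      by_cases hmatch : pvG arr j = pvG arr i - (j - i)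
      · rw [if_pos hmatch]
        by_cases hone : pvG arr j = 1
        · -- the countdown is completed at j: A counts and sets skipUntil := j
          rw [if_pos hone]
          have hk2 : 2 ≤ k := by omega
          simp only [pvOuterA]
          have hskip : j ≤ (pvInnerA arr i (PySem.List.pyRange (j + 1) n 1) (c + 1, j)).2 :=
            pvInner_skip_ge arr i _ j (c + 1, j) (by simp)
              (fun x hx => by
                have := (PySem.List.mem_pyRange_one (a := j + 1) (b := n)).1 hx
                omega)
          rw [if_pos hskip]
          have := ihs.2 i (c + 1) j (by omega) (by omega) hgi
          rw [this]
          have hzero : pvG arr i - (j + 1 - i) = 0 := by omega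
          rw [hzero, pvLoopB_nonpos k arr (by omega) _ (c + 1) 0 le_rfl]
          simp only [pvLoopB]
          rw [if_pos hmatch, if_pos hone]
        · -- matched but not yet 1: both sides keep descending
          rw [if_neg hone]
          simp only [pvOuterA]
          by_cases hsk2 : j ≤ (pvInnerA arr i (PySem.List.pyRange (j + 1) n 1) (c, skip)).2
          · rw [if_pos hsk2]
            have := ihs.2 i c skip (by omega) (by omega) hgi
            rw [this]
            simp only [pvLoopB]
            rw [if_pos hmatch, if_neg hone]
            congr 2
            omega
          · rw [if_neg hsk2, if_neg (by omega : ¬ pvG arr j = k)]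
            have := ihs.2 i c skip (by omega) (by omega) hgi
            rw [this]
            simp only [pvLoopB]
            rw [if_pos hmatch, if_neg hone]
            congr 2
            omega
      · -- break: inner scan stops, both loops fall back to the no-countdown state at j
        rw [if_neg hmatch]
        have h1 := hS1 c skip hsk
        rw [PySem.List.pyRange_one_cons hjn] at h1
        rw [h1]
        exact (pvLoopB_mismatch k arr j _ c _ hmatch).symm

-- ===== VERDICT (by name: the statement is the Claim_ definition above) =====
theorem getCountdowns_spec : Claim_equal_getCountdowns := by
  intro case _ _
  unfold Spec_getCountdowns getCountdowns getCountdowns_alt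
  exact (pvMain case.1 case.2.1 case.2.2 (case.1 - 0).toNat 0 (by omega)).1 0 (-1) (by omega)
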